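-- pv_equiv track=rewrite | github.com/mrazr/ctc_utils | unet.py | get_crop_sizes
-- ===== SOURCE A (Python) =====
-- from typing import List, Tuple
--
-- def compute_last_img_size(sz, depth, padding: str='valid') -> int:
--     d = 4 if padding == 'valid' else 0
--     cs = sz
--     for i in range(depth - 1):
--         cs -= d
--         if cs % 2:
--             return 5 # 5 is an odd number (I think)
--         cs = cs // 2
--     return cs - d
--
-- def get_crop_sizes(sz, depth, padding: str='valid') -> List[Tuple[int, int]]:
--     sizes: List[Tuple[int, int]] = []
--     curr_img_size = compute_last_img_size(sz, depth, padding=padding)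
--     d = 4 if padding == 'valid' else 0
--     for i in range(depth - 1):
--         curr_img_size *= 2
--         sizes.append((curr_img_size, curr_img_size))
--         curr_img_size -= d
--     return sizes
-- ===== SOURCE B (Python) =====
-- from typing import List, Tuple
--
-- def compute_last_img_size(sz, depth, padding: str='valid') -> int:
--     d = 4 if padding == 'valid' else 0
--     cs = sz
--     for i in range(depth - 1):
--         cs -= d
--         if cs % 2:
--             return 5 # 5 is an odd number (I think)
--         cs = cs // 2
--     return cs - d
--
-- def get_crop_sizes(sz, depth, padding: str='valid') -> List[Tuple[int, int]]:
--     d = 4 if padding == 'valid' else 0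
--     base = compute_last_img_size(sz, depth, padding=padding) - d
--     return [((base << (k + 1)) + 2 * d,) * 2 for k in range(depth - 1)]
-- ===== Notes on version B (the rewrite author's own statement) =====
-- stated objective: simpler
-- what changed: B replaces A's stateful doubling/subtracting accumulator loop with a direct list comprehension emitting the k-th crop size from the closed form 2**(k+1)*(last-d)+2*d.
import Mathlib
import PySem

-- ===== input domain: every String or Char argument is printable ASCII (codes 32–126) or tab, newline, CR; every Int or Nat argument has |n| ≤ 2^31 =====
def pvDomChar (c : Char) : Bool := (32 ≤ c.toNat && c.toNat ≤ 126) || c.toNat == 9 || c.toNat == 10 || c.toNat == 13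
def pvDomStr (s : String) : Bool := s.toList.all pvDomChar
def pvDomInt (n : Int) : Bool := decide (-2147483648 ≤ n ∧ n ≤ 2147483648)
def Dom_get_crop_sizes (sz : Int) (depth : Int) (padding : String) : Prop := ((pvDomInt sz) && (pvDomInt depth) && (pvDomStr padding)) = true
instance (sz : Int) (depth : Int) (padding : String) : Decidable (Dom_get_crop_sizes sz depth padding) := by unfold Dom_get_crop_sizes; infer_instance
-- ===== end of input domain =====

-- B replaces A's stateful doubling/subtracting accumulator loop with a direct list
-- comprehension emitting the k-th crop size from a closed form (objective: simpler).

-- ===== PORT A =====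
-- shared helper: literal port of compute_last_img_size (loop with early 5-return)
def clisLoop (d : Int) : Int → Nat → Int
  | cs, 0 => cs - d
  | cs, n + 1 =>
    let cs := cs - d
    if PySem.Int.mod cs 2 ≠ 0 then 5
    else clisLoop d (PySem.Int.floordiv cs 2) n

def compute_last_img_size (sz : Int) (depth : Int) (padding : String) : Int :=
  let d : Int := if padding == "valid" then 4 else 0
  clisLoop d sz (depth - 1).toNat

-- A's loop: curr *= 2; append (curr, curr); curr -= d
def aLoop (d : Int) : Int → Nat → List (Int × Int)
  | _, 0 => []
  | curr, n + 1 =>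
    let curr := curr * 2
    (curr, curr) :: aLoop d (curr - d) n

def get_crop_sizes (sz : Int) (depth : Int) (padding : String) : List (Int × Int) :=
  let curr := compute_last_img_size sz depth padding
  let d : Int := if padding == "valid" then 4 else 0
  aLoop d curr (depth - 1).toNat

-- ===== PORT B =====
def get_crop_sizes_alt (sz : Int) (depth : Int) (padding : String) : List (Int × Int) :=
  let d : Int := if padding == "valid" then 4 else 0
  let base := compute_last_img_size sz depth padding - d
  -- Python's 'base << (k + 1)' ported as multiplication by 2^(k+1): exact, since the
  -- shift count k+1 is a nonnegative int
  (List.range (depth - 1).toNat).map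
    (fun k => (base * 2 ^ (k + 1) + 2 * d, base * 2 ^ (k + 1) + 2 * d))

-- ===== PRECONDITION & SPEC =====
def Spec_get_crop_sizes (sz : Int) (depth : Int) (padding : String) (out : List (Int × Int)) : Prop := out = get_crop_sizes_alt sz depth padding
instance (sz : Int) (depth : Int) (padding : String) (out : List (Int × Int)) : Decidable (Spec_get_crop_sizes sz depth padding out) := by unfold Spec_get_crop_sizes; infer_instance

-- ===== CLAIM (what is proved, stated in full; the proofs are below) =====
def Claim_equal_get_crop_sizes : Prop := ∀ (sz : Int) (depth : Int) (padding : String), Dom_get_crop_sizes sz depth padding → Spec_get_crop_sizes sz depth padding (get_crop_sizes sz depth padding)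

-- ===== LEMMAS AND PROOFS =====
theorem aLoop_closed (d : Int) (curr : Int) (n : Nat) :
    aLoop d curr n =
      (List.range n).map
        (fun k => ((curr - d) * 2 ^ (k + 1) + 2 * d,
                   (curr - d) * 2 ^ (k + 1) + 2 * d)) := by
  induction n generalizing curr with
  | zero => simp [aLoop]
  | succ n ih =>
    rw [List.range_succ_eq_map]
    simp only [aLoop, List.map_cons, List.map_map, ih]
    refine congrArg₂ List.cons ?_ ?_
    · simp only [Prod.mk.injEq]
      constructor <;> ring
    · apply List.map_congr_left
      intro k _
      simp only [Function.comp, Nat.succ_eq_add_one, Prod.mk.injEq]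
      constructor <;> ring

-- ===== VERDICT (by name: the statement is the Claim_ definition above) =====
theorem get_crop_sizes_spec : Claim_equal_get_crop_sizes := by
  intro sz depth padding _
  unfold Spec_get_crop_sizes get_crop_sizes get_crop_sizes_alt
  simp only [aLoop_closed]
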